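-- pv_equiv track=rewrite | github.com/qs1nes1/MKR1 | tasks.py | calculate_population_change
-- ===== SOURCE A (Python) =====
-- def calculate_population_change(population_data):
--     population_change = {}
--     for country, data in population_data.items():
--         population_change[country] = []
--         prev_population = None
--         for year, population in data:
--             if prev_population is not None:
--                 change = population - prev_population
--                 population_change[country].append((year, change))
--             prev_population = population
--     return population_change
-- ===== SOURCE B (Python) =====
-- def calculate_population_change(population_data):
--     population_change = {}
--     for country, series in population_data.items():
--         changes = []
--         i = len(series) - 1
--         while i >= 1:
--             year, population = series[i]
--             changes.append((year, population - series[i - 1][1]))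
--             i -= 1
--         changes.reverse()
--         population_change[country] = changes
--     return population_change
-- ===== Notes on version B (the rewrite author's own statement) =====
-- stated objective: alternative
-- what changed: Replaces the forward pass with a prev_population state machine by a backward index walk from the end of each series that appends each year-over-year difference via random access (series[i], series[i-1]) and builds the result list back-to-front, reversing it once at the end.
import Mathlib
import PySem

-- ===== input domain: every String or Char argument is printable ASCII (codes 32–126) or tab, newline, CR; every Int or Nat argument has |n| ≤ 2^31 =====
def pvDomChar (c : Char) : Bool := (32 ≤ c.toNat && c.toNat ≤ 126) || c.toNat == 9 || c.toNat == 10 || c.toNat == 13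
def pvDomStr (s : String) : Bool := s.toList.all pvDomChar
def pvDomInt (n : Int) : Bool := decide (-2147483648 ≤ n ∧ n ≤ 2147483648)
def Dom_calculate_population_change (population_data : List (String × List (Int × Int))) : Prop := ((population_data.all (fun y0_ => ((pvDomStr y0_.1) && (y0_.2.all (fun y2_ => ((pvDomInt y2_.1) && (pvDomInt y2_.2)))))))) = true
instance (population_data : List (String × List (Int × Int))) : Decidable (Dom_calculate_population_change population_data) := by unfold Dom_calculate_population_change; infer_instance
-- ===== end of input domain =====

-- B replaces A's forward prev_population state machine by a backward index walk that builds
-- each country's change list back-to-front via random access and reverses it once — alternative decomposition, same cost.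


-- ===== PORT A =====
-- outer loop over items; inner loop carries (dict, prev_population : Option Int) and
-- appends (year, change) to population_change[country] exactly where A does
def calculate_population_change (population_data : List (String × List (Int × Int))) : List (String × List (Int × Int)) :=
  (population_data.foldl
    (fun pc cd =>
      (cd.2.foldl
        (fun (s : PySem.Dict String (List (Int × Int)) × Option Int) yp =>
          (match s.2 with
           | some prev => s.1.modify cd.1 [] (fun l => l ++ [(yp.1, yp.2 - prev)])
           | none => s.1,
           some yp.2))
        (pc.insert cd.1 [], none)).1)
    PySem.Dict.empty).items

-- ===== PORT B =====
-- the diff Python's loop body computes at index i (in-range by the loop guard, so getD is exact)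
def pvDiffAt (s : List (Int × Int)) (i : Nat) : Int × Int :=
  ((s.getD i (0, 0)).1, (s.getD i (0, 0)).2 - (s.getD (i - 1) (0, 0)).2)

-- Source B's 'while i >= 1' walk, i counting down: appends to the end of changes as Python does
-- (Python starts at i = len-1, which is -1 on an empty series and runs zero iterations,
--  exactly as Nat's length - 1 = 0 does here)
def pvRevLoop (s : List (Int × Int)) : Nat → List (Int × Int) → List (Int × Int)
  | 0, changes => changes
  | i + 1, changes => pvRevLoop s i (changes ++ [pvDiffAt s (i + 1)])

def calculate_population_change_alt (population_data : List (String × List (Int × Int))) : List (String × List (Int × Int)) :=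
  (population_data.foldl
    (fun pc cd =>
      pc.insert cd.1 ((pvRevLoop cd.2 (cd.2.length - 1) []).reverse))
    PySem.Dict.empty).items

-- ===== PRECONDITION & SPEC =====
def Spec_calculate_population_change (population_data : List (String × List (Int × Int))) (out : List (String × List (Int × Int))) : Prop := out = calculate_population_change_alt population_data
instance (population_data : List (String × List (Int × Int))) (out : List (String × List (Int × Int))) : Decidable (Spec_calculate_population_change population_data out) := by unfold Spec_calculate_population_change; infer_instance

-- ===== CLAIM (what is proved, stated in full; the proofs are below) =====
def Claim_equal_calculate_population_change : Prop := ∀ (population_data : List (String × List (Int × Int))), Dom_calculate_population_change population_data → Spec_calculate_population_change population_data (calculate_population_change population_data)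

-- ===== LEMMAS AND PROOFS =====

-- the changes list A accumulates once a previous population `prev` is known
def pvChg (prev : Int) : List (Int × Int) → List (Int × Int)
  | [] => []
  | (y, p) :: r => (y, p - prev) :: pvChg p r

-- A's inner loop, once prev is set, appends exactly pvChg prev data to the country's entry
theorem pvInner_some (c : String) (data : List (Int × Int)) :
    ∀ (prev : Int) (acc : List (Int × Int)) (d : PySem.Dict String (List (Int × Int))),
    (data.foldl
      (fun (s : PySem.Dict String (List (Int × Int)) × Option Int) yp =>
        (match s.2 with
         | some prev => s.1.modify c [] (fun l => l ++ [(yp.1, yp.2 - prev)])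
         | none => s.1,
         some yp.2))
      (d.insert c acc, some prev)).1 = d.insert c (acc ++ pvChg prev data) := by
  induction data with
  | nil => intro prev acc d; simp [pvChg]
  | cons yp r ih =>
    intro prev acc d
    have hstep : (d.insert c acc).modify c [] (fun l => l ++ [(yp.1, yp.2 - prev)])
        = d.insert c (acc ++ [(yp.1, yp.2 - prev)]) := by
      show (d.insert c acc).insert c (((d.insert c acc).getD c []) ++ [(yp.1, yp.2 - prev)])
          = d.insert c (acc ++ [(yp.1, yp.2 - prev)])
      rw [PySem.Dict.getD_insert_self, PySem.Dict.insert_insert_self]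
    simp only [List.foldl_cons, hstep]
    rw [ih yp.2 (acc ++ [(yp.1, yp.2 - prev)]) d]
    cases yp with
    | mk y p => simp [pvChg, List.append_assoc]

-- the ascending-index list of diffs 1..k
theorem pvRevLoop_eq_range (s : List (Int × Int)) :
    ∀ (k : Nat) (acc : List (Int × Int)),
    pvRevLoop s k acc = acc ++ ((List.range k).map (fun j => pvDiffAt s (j + 1))).reverse := by
  intro k
  induction k with
  | zero => intro acc; simp [pvRevLoop]
  | succ k ih =>
    intro acc
    simp [pvRevLoop, ih, List.range_succ]

-- pvChg prev r is exactly the index-based diff list over (y, prev) :: r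
theorem pvChg_eq_range (r : List (Int × Int)) :
    ∀ (y prev : Int),
    pvChg prev r = (List.range r.length).map (fun j => pvDiffAt ((y, prev) :: r) (j + 1)) := by
  induction r with
  | nil => intro y prev; simp [pvChg]
  | cons b r' ih =>
    intro y prev
    cases b with
    | mk y1 p1 =>
      simp only [pvChg, List.length_cons, List.range_succ_eq_map, List.map_cons, List.map_map]
      have h0 : pvDiffAt ((y, prev) :: (y1, p1) :: r') (0 + 1) = (y1, p1 - prev) := by
        simp [pvDiffAt, List.getD]
      have h1 : List.map ((fun j => pvDiffAt ((y, prev) :: (y1, p1) :: r') (j + 1)) ∘ Nat.succ)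
            (List.range r'.length)
          = List.map (fun j => pvDiffAt ((y1, p1) :: r') (j + 1)) (List.range r'.length) :=
        List.map_congr_left (fun j _ => by simp [pvDiffAt, List.getD, Function.comp])
      rw [h0, h1, ih y1 p1]

-- A's full inner loop (prev starts at None) produces exactly B's backward-walk-then-reverse list
theorem pvInner_eq (c : String) (data : List (Int × Int)) (d : PySem.Dict String (List (Int × Int))) :
    (data.foldl
      (fun (s : PySem.Dict String (List (Int × Int)) × Option Int) yp =>
        (match s.2 with
         | some prev => s.1.modify c [] (fun l => l ++ [(yp.1, yp.2 - prev)])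
         | none => s.1,
         some yp.2))
      (d.insert c [], none)).1
    = d.insert c ((pvRevLoop data (data.length - 1) []).reverse) := by
  cases data with
  | nil => simp [pvRevLoop]
  | cons yp r =>
    cases yp with
    | mk y p =>
      simp only [List.foldl_cons]
      rw [pvInner_some c r p [] d, List.nil_append]
      rw [pvRevLoop_eq_range, pvChg_eq_range r y p]
      simp

-- the two outer folds agree from any starting dict
theorem pvOuter_eq (pd : List (String × List (Int × Int))) :
    ∀ (d : PySem.Dict String (List (Int × Int))),
    pd.foldl
      (fun pc cd =>
        (cd.2.foldl
          (fun (s : PySem.Dict String (List (Int × Int)) × Option Int) yp =>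
            (match s.2 with
             | some prev => s.1.modify cd.1 [] (fun l => l ++ [(yp.1, yp.2 - prev)])
             | none => s.1,
             some yp.2))
          (pc.insert cd.1 [], none)).1) d
    = pd.foldl
      (fun pc cd =>
        pc.insert cd.1 ((pvRevLoop cd.2 (cd.2.length - 1) []).reverse)) d := by
  induction pd with
  | nil => intro d; rfl
  | cons cd rest ih =>
    intro d
    simp only [List.foldl_cons]
    rw [pvInner_eq cd.1 cd.2 d]
    exact ih _

-- ===== VERDICT (by name: the statement is the Claim_ definition above) =====
theorem calculate_population_change_spec : Claim_equal_calculate_population_change := by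
  intro pd _
  unfold Spec_calculate_population_change calculate_population_change calculate_population_change_alt
  exact congrArg PySem.Dict.items (pvOuter_eq pd PySem.Dict.empty)
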